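-- pv_equiv track=rewrite | github.com/openshift-eng/ai-helpers | plugins/ci/skills/parse-junit/parse_junit.py | _parse_system_out_yaml
-- ===== SOURCE A (Python) =====
-- def _parse_system_out_yaml(text: str) -> dict:
--     """Parse the YAML-like system-out from aggregated JUnit XML.
--
--     Aggregated JUnit files (from release-analysis-aggregator) embed per-run
--     results in ``<system-out>`` as simple YAML with sections ``passes:``,
--     ``failures:``, and ``skips:``.  Each entry contains ``jobRunID``,
--     ``humanURL``, and ``gcsArtifactURL``.
--
--     Returns dict with keys 'passes', 'failures', 'skips', each a list of
--     dicts.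
--     """
--     result = {"passes": [], "failures": [], "skips": []}
--     if not text:
--         return result
--
--     current_section = None
--     current_entry = {}
--
--     for line in text.strip().splitlines():
--         stripped = line.strip()
--
--         # Section headers
--         if stripped in ("passes:", "failures:", "skips:"):
--             if current_entry and current_section:
--                 result[current_section].append(current_entry)
--                 current_entry = {}
--             current_section = stripped.rstrip(":")
--             continue
--
--         if current_section is None:
--             continue
--
--         # New list item (``- key: value``)
--         if stripped.startswith("- "):
--             if current_entry:
--                 result[current_section].append(current_entry)
--             current_entry = {}
--             kv = stripped[2:]
--             if ":" in kv:
--                 key, val = kv.split(":", 1)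
--                 current_entry[key.strip()] = val.strip().strip('"')
--         elif ":" in stripped:
--             # Continuation key
--             key, val = stripped.split(":", 1)
--             current_entry[key.strip()] = val.strip().strip('"')
--
--     if current_entry and current_section:
--         result[current_section].append(current_entry)
--
--     return result
-- ===== SOURCE B (Python) =====
-- def _parse_system_out_yaml(text: str) -> dict:
--     """Two-phase reimplementation: partition lines into per-header runs, then
--     split each run into dash-item blocks and parse each block."""
--     lines = [ln.strip() for ln in text.strip().splitlines()]
--     # phase 1: partition into runs, one per section-header occurrence
--     runs = []
--     section = None
--     body = []
--     for line in lines: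
--         if line in ("passes:", "failures:", "skips:"):
--             if section is not None:
--                 runs.append((section, body))
--             section = line[:-1]
--             body = []
--         elif section is not None:
--             body.append(line)
--     if section is not None:
--         runs.append((section, body))
--     # phase 2: parse each run independently
--     result = {"passes": [], "failures": [], "skips": []}
--     for section, body in runs:
--         entries = _parse_run(body)
--         if entries:
--             result[section].extend(entries)
--     return result
--
--
-- def _parse_run(lines):
--     # split into blocks at dash-item lines; leading continuation lines form block 0
--     blocks = [[]]
--     for line in lines:
--         if line.startswith("- "):
--             blocks.append([line[2:]])
--         else:
--             blocks[-1].append(line)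
--     return [e for e in (_parse_block(b) for b in blocks) if e]
--
--
-- def _parse_block(block):
--     entry = {}
--     for line in block:
--         if ":" in line:
--             key, val = line.split(":", 1)
--             entry[key.strip()] = val.strip().strip('"')
--     return entry
-- ===== Notes on version B (the rewrite author's own statement) =====
-- stated objective: alternative
-- what changed: A's single stateful line scan (section/current-entry state machine with interleaved flushes) is re-decomposed into two passes: first partition the stripped lines into per-header runs, then split each run into dash-item blocks and parse each block into an entry dict.
import Mathlib
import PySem

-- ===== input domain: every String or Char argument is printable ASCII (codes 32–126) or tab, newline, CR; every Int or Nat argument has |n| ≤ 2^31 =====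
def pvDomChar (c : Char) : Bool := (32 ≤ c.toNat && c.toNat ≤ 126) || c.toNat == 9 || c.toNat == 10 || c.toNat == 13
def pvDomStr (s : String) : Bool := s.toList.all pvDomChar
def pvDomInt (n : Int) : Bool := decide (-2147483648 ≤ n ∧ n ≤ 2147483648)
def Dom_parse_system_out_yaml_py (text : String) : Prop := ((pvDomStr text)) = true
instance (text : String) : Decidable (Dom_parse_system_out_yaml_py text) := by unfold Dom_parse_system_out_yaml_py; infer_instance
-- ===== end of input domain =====

set_option maxHeartbeats 4000000

-- B re-decomposes A's single stateful scan into two phases (partition into header runs, then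
-- split each run into dash-item blocks and parse blocks); same return value, objective: alternative.

-- ===== PORT A =====
-- exact hand port of `s.rstrip(":")`: drop trailing ':' characters
def pvRstripColon (s : String) : String :=
  String.ofList (((s.toList.reverse).dropWhile (fun c => c == ':')).reverse)

-- `if ":" in kv: key, val = kv.split(":", 1); entry[key.strip()] = val.strip().strip('"')`
-- (this statement occurs verbatim in both Pythons)
def pvAddKV (entry : PySem.Dict String String) (kv : String) : PySem.Dict String String :=
  if PySem.Str.isIn ":" kv then
    match PySem.Str.splitMax? kv ":" 1 with
    | some (key :: val :: _) =>
        entry.insert (PySem.Str.strip key) (PySem.Str.stripChars (PySem.Str.strip val) "\"")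
    | _ => entry   -- unreachable: split(":", 1) yields two parts when ":" occurs
  else entry

-- `{"passes": [], "failures": [], "skips": []}` (built by both Pythons)
def pvInitResult : PySem.Dict String (List (PySem.Dict String String)) :=
  PySem.Dict.ofList [("passes", []), ("failures", []), ("skips", [])]

-- the returned dict under the type convention (dict → assoc list, inner dicts → assoc lists)
def pvItemsOut (d : PySem.Dict String (List (PySem.Dict String String))) :
    List (String × List (List (String × String))) :=
  d.items.map (fun p => (p.1, p.2.map PySem.Dict.items))

-- one iteration of A's `for line in text.strip().splitlines():` body
def pvA_step
    (st : PySem.Dict String (List (PySem.Dict String String)) × Option String × PySem.Dict String String)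
    (line : String) :
    PySem.Dict String (List (PySem.Dict String String)) × Option String × PySem.Dict String String :=
  let res := st.1
  let sec? := st.2.1
  let entry := st.2.2
  let stripped := PySem.Str.strip line
  if stripped = "passes:" ∨ stripped = "failures:" ∨ stripped = "skips:" then
    match sec? with
    | some sec =>
        if entry.items = [] then (res, some (pvRstripColon stripped), entry)
        else (res.modify sec [] (fun l => l ++ [entry]), some (pvRstripColon stripped), PySem.Dict.empty)
    | none => (res, some (pvRstripColon stripped), entry)
  else
    match sec? with
    | none => (res, sec?, entry)
    | some sec =>
        if PySem.Str.startswith stripped "- " then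
          ((if entry.items = [] then res else res.modify sec [] (fun l => l ++ [entry])),
           some sec, pvAddKV PySem.Dict.empty (PySem.Str.slice stripped (some 2) none))
        else if PySem.Str.isIn ":" stripped then
          (res, some sec, pvAddKV entry stripped)
        else (res, sec?, entry)

-- final `if current_entry and current_section: result[current_section].append(current_entry)`
def pvA_finish
    (st : PySem.Dict String (List (PySem.Dict String String)) × Option String × PySem.Dict String String) :
    PySem.Dict String (List (PySem.Dict String String)) :=
  match st.2.1 with
  | some sec => if st.2.2.items = [] then st.1 else st.1.modify sec [] (fun l => l ++ [st.2.2])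
  | none => st.1

def parse_system_out_yaml_py (text : String) : List (String × List (List (String × String))) :=
  if text = "" then pvItemsOut pvInitResult
  else
    pvItemsOut (pvA_finish
      ((PySem.Str.splitlines (PySem.Str.strip text)).foldl pvA_step
        (pvInitResult, none, PySem.Dict.empty)))

-- ===== PORT B =====
-- phase 1 loop body: partition stripped lines into per-header runs
def pvB_run_step
    (st : List (String × List String) × Option String × List String) (line : String) :
    List (String × List String) × Option String × List String :=
  if line = "passes:" ∨ line = "failures:" ∨ line = "skips:" then
    ((match st.2.1 with
      | some s => st.1 ++ [(s, st.2.2)]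
      | none => st.1),
     some (PySem.Str.slice line none (some (-1))), [])
  else
    match st.2.1 with
    | some _ => (st.1, st.2.1, st.2.2 ++ [line])
    | none => st

-- `blocks[-1].append(line)` / `blocks.append([line[2:]])`
def pvB_block_step (blocks : List (List String)) (line : String) : List (List String) :=
  if PySem.Str.startswith line "- " then blocks ++ [[PySem.Str.slice line (some 2) none]]
  else blocks.dropLast ++ [(blocks.getLast?.getD []) ++ [line]]

def pvB_parse_block (block : List String) : PySem.Dict String String :=
  block.foldl pvAddKV PySem.Dict.empty

def pvB_parse_run (lines : List String) : List (PySem.Dict String String) :=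
  ((lines.foldl pvB_block_step [[]]).map pvB_parse_block).filter (fun e => !e.items.isEmpty)

-- phase 2: `for section, body in runs: entries = _parse_run(body); if entries: result[section].extend(entries)`
def pvB_apply
    (res : PySem.Dict String (List (PySem.Dict String String)))
    (runs : List (String × List String)) :
    PySem.Dict String (List (PySem.Dict String String)) :=
  runs.foldl
    (fun res r =>
      if pvB_parse_run r.2 = [] then res
      else res.modify r.1 [] (fun l => l ++ pvB_parse_run r.2))
    res

-- final `if section is not None: runs.append((section, body))`
def pvB_finalize (st : List (String × List String) × Option String × List String) :
    List (String × List String) :=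
  match st.2.1 with
  | some s => st.1 ++ [(s, st.2.2)]
  | none => st.1

def parse_system_out_yaml_py_alt (text : String) : List (String × List (List (String × String))) :=
  let lines := (PySem.Str.splitlines (PySem.Str.strip text)).map PySem.Str.strip
  pvItemsOut (pvB_apply pvInitResult (pvB_finalize (lines.foldl pvB_run_step ([], none, []))))

-- ===== PRECONDITION & SPEC =====
def Spec_parse_system_out_yaml_py (text : String) (out : List (String × List (List (String × String)))) : Prop := out = parse_system_out_yaml_py_alt text
instance (text : String) (out : List (String × List (List (String × String)))) : Decidable (Spec_parse_system_out_yaml_py text out) := by unfold Spec_parse_system_out_yaml_py; infer_instance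

-- ===== CLAIM (what is proved, stated in full; the proofs are below) =====
def Claim_equal_parse_system_out_yaml_py : Prop := ∀ (text : String), Dom_parse_system_out_yaml_py text → Spec_parse_system_out_yaml_py text (parse_system_out_yaml_py text)

-- ===== LEMMAS AND PROOFS =====

-- flushing a pending entry into the result, and the flushed entry list
def pvFlush1 (res : PySem.Dict String (List (PySem.Dict String String))) (s : String)
    (e : PySem.Dict String String) : PySem.Dict String (List (PySem.Dict String String)) :=
  if e.items = [] then res else res.modify s [] (fun l => l ++ [e])

def pvFlushList (e : PySem.Dict String String) : List (PySem.Dict String String) :=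
  if e.items = [] then [] else [e]

-- common middle semantics over STRIPPED lines, inside a section
def pvM (res : PySem.Dict String (List (PySem.Dict String String))) (s : String)
    (e : PySem.Dict String String) : List String → PySem.Dict String (List (PySem.Dict String String))
  | [] => pvFlush1 res s e
  | l :: ls =>
      if l = "passes:" ∨ l = "failures:" ∨ l = "skips:" then
        pvM (pvFlush1 res s e) (pvRstripColon l) PySem.Dict.empty ls
      else if PySem.Str.startswith l "- " then
        pvM (pvFlush1 res s e) s (pvAddKV PySem.Dict.empty (PySem.Str.slice l (some 2) none)) ls
      else pvM res s (pvAddKV e l) ls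

-- common middle semantics before the first header
def pvMnone (res : PySem.Dict String (List (PySem.Dict String String))) :
    List String → PySem.Dict String (List (PySem.Dict String String))
  | [] => res
  | l :: ls =>
      if l = "passes:" ∨ l = "failures:" ∨ l = "skips:" then
        pvM res (pvRstripColon l) PySem.Dict.empty ls
      else pvMnone res ls

-- run-body semantics: (completed entries, pending entry)
def pvH (e : PySem.Dict String String) :
    List String → List (PySem.Dict String String) × PySem.Dict String String
  | [] => ([], e)
  | l :: ls =>
      if PySem.Str.startswith l "- " then
        (pvFlushList e ++ (pvH (pvAddKV PySem.Dict.empty (PySem.Str.slice l (some 2) none)) ls).1,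
         (pvH (pvAddKV PySem.Dict.empty (PySem.Str.slice l (some 2) none)) ls).2)
      else pvH (pvAddKV e l) ls

-- remaining blocks from a current block
def pvBlocksCont (b : List String) : List String → List (List String)
  | [] => [b]
  | l :: ls =>
      if PySem.Str.startswith l "- " then
        b :: pvBlocksCont [PySem.Str.slice l (some 2) none] ls
      else pvBlocksCont (b ++ [l]) ls

-- remaining runs from a current run
def pvRunsCont (s : String) (body : List String) : List String → List (String × List String)
  | [] => [(s, body)]
  | l :: ls =>
      if l = "passes:" ∨ l = "failures:" ∨ l = "skips:" then
        (s, body) :: pvRunsCont (pvRstripColon l) [] ls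
      else pvRunsCont s (body ++ [l]) ls

def pvRunsNone : List String → List (String × List String)
  | [] => []
  | l :: ls =>
      if l = "passes:" ∨ l = "failures:" ∨ l = "skips:" then
        pvRunsCont (pvRstripColon l) [] ls
      else pvRunsNone ls

def pvCondMod (res : PySem.Dict String (List (PySem.Dict String String))) (s : String)
    (xs : List (PySem.Dict String String)) : PySem.Dict String (List (PySem.Dict String String)) :=
  if xs = [] then res else res.modify s [] (fun l => l ++ xs)

theorem pvAddKV_no_colon (e : PySem.Dict String String) (l : String)
    (h : ¬ PySem.Str.isIn ":" l = true) : pvAddKV e l = e := by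
  unfold pvAddKV; rw [if_neg h]

theorem pv_items_nil_eq_empty (e : PySem.Dict String String) (h : e.items = []) :
    e = PySem.Dict.empty := by
  apply PySem.Dict.ext; simpa [PySem.Dict.empty] using h

theorem pv_insert_insert_same {ν : Type} (d : PySem.Dict String ν) (k : String) (a b : ν) :
    (d.insert k a).insert k b = d.insert k b := by
  apply PySem.Dict.ext
  by_cases h : d.contains k = true
  · rw [PySem.Dict.items_insert_of_contains _ _ h,
        PySem.Dict.items_insert_of_contains _ _ (by simp),
        PySem.Dict.items_insert_of_contains _ _ h, List.map_map]
    apply List.map_congr_left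
    intro p _
    by_cases hp : p.1 = k <;> simp [hp]
  · have hf : d.contains k = false := Bool.eq_false_iff.mpr h
    rw [PySem.Dict.items_insert_of_not_contains _ _ hf,
        PySem.Dict.items_insert_of_contains _ _ (PySem.Dict.contains_insert_self d k a),
        PySem.Dict.items_insert_of_not_contains _ _ hf]
    rw [List.map_append]
    congr 1
    swap
    · simp
    have hid : ∀ p ∈ d.items,
        (fun p : String × ν => if (p.1 == k) = true then (k, b) else p) p = id p := by
      intro p hp
      have hne : ¬ p.1 = k := by
        intro hk
        apply h
        rw [PySem.Dict.contains_iff_mem_keys]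
        simp only [PySem.Dict.keys]
        exact hk ▸ List.mem_map_of_mem hp
      simp [hne]
    exact (List.map_congr_left hid).trans (List.map_id _)

theorem pv_modify_modify_append {ν : Type} (d : PySem.Dict String (List ν)) (k : String)
    (x y : List ν) :
    (d.modify k [] (fun l => l ++ x)).modify k [] (fun l => l ++ y)
      = d.modify k [] (fun l => l ++ (x ++ y)) := by
  show ((d.insert k (d.getD k [] ++ x)).insert k
      ((d.insert k (d.getD k [] ++ x)).getD k [] ++ y)) = _
  rw [PySem.Dict.getD_insert_self, pv_insert_insert_same, List.append_assoc]
  rfl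

theorem pvFlush1_condMod (res : PySem.Dict String (List (PySem.Dict String String))) (s : String)
    (xs : List (PySem.Dict String String)) (e : PySem.Dict String String) :
    pvFlush1 (pvCondMod res s xs) s e = pvCondMod res s (xs ++ pvFlushList e) := by
  by_cases he : e.items = []
  · simp [pvFlush1, pvFlushList, he]
  · by_cases hx : xs = []
    · simp [pvFlush1, pvFlushList, pvCondMod, he, hx]
    · have hxe : ¬ (xs ++ [e] = []) := by simp
      simp only [pvFlush1, pvCondMod, pvFlushList, he, hx, if_false, if_neg hxe]
      rw [pv_modify_modify_append]

-- ===== A side =====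
theorem pvA_step_hdr_mt (res : PySem.Dict String (List (PySem.Dict String String))) (s : String)
    (e : PySem.Dict String String) (l : String)
    (hh : PySem.Str.strip l = "passes:" ∨ PySem.Str.strip l = "failures:" ∨ PySem.Str.strip l = "skips:")
    (he : e.items = []) :
    pvA_step (res, some s, e) l = (res, some (pvRstripColon (PySem.Str.strip l)), e) := by
  simp only [pvA_step]; rw [if_pos hh, if_pos he]

theorem pvA_step_hdr_full (res : PySem.Dict String (List (PySem.Dict String String))) (s : String)
    (e : PySem.Dict String String) (l : String)
    (hh : PySem.Str.strip l = "passes:" ∨ PySem.Str.strip l = "failures:" ∨ PySem.Str.strip l = "skips:")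
    (he : ¬ e.items = []) :
    pvA_step (res, some s, e) l
      = (res.modify s [] (fun l => l ++ [e]), some (pvRstripColon (PySem.Str.strip l)),
         PySem.Dict.empty) := by
  simp only [pvA_step]; rw [if_pos hh, if_neg he]

theorem pvA_step_hdr_none (res : PySem.Dict String (List (PySem.Dict String String)))
    (e : PySem.Dict String String) (l : String)
    (hh : PySem.Str.strip l = "passes:" ∨ PySem.Str.strip l = "failures:" ∨ PySem.Str.strip l = "skips:") :
    pvA_step (res, none, e) l = (res, some (pvRstripColon (PySem.Str.strip l)), e) := by
  simp only [pvA_step]; rw [if_pos hh]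

theorem pvA_step_none (res : PySem.Dict String (List (PySem.Dict String String)))
    (e : PySem.Dict String String) (l : String)
    (hh : ¬ (PySem.Str.strip l = "passes:" ∨ PySem.Str.strip l = "failures:" ∨ PySem.Str.strip l = "skips:")) :
    pvA_step (res, none, e) l = (res, none, e) := by
  simp only [pvA_step]; rw [if_neg hh]

theorem pvA_step_dash (res : PySem.Dict String (List (PySem.Dict String String))) (s : String)
    (e : PySem.Dict String String) (l : String)
    (hh : ¬ (PySem.Str.strip l = "passes:" ∨ PySem.Str.strip l = "failures:" ∨ PySem.Str.strip l = "skips:"))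
    (hd : PySem.Str.startswith (PySem.Str.strip l) "- " = true) :
    pvA_step (res, some s, e) l
      = (pvFlush1 res s e, some s,
         pvAddKV PySem.Dict.empty (PySem.Str.slice (PySem.Str.strip l) (some 2) none)) := by
  simp only [pvA_step, pvFlush1]; rw [if_neg hh, if_pos hd]

theorem pvA_step_colon (res : PySem.Dict String (List (PySem.Dict String String))) (s : String)
    (e : PySem.Dict String String) (l : String)
    (hh : ¬ (PySem.Str.strip l = "passes:" ∨ PySem.Str.strip l = "failures:" ∨ PySem.Str.strip l = "skips:"))
    (hd : ¬ PySem.Str.startswith (PySem.Str.strip l) "- " = true)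
    (hc : PySem.Str.isIn ":" (PySem.Str.strip l) = true) :
    pvA_step (res, some s, e) l = (res, some s, pvAddKV e (PySem.Str.strip l)) := by
  simp only [pvA_step]; rw [if_neg hh, if_neg hd, if_pos hc]

theorem pvA_step_skip (res : PySem.Dict String (List (PySem.Dict String String))) (s : String)
    (e : PySem.Dict String String) (l : String)
    (hh : ¬ (PySem.Str.strip l = "passes:" ∨ PySem.Str.strip l = "failures:" ∨ PySem.Str.strip l = "skips:"))
    (hd : ¬ PySem.Str.startswith (PySem.Str.strip l) "- " = true)
    (hc : ¬ PySem.Str.isIn ":" (PySem.Str.strip l) = true) :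
    pvA_step (res, some s, e) l = (res, some s, e) := by
  simp only [pvA_step]; rw [if_neg hh, if_neg hd, if_neg hc]

theorem pvA_main (ls : List String) :
    ∀ (res : PySem.Dict String (List (PySem.Dict String String))) (s : String)
      (e : PySem.Dict String String),
      pvA_finish (ls.foldl pvA_step (res, some s, e)) = pvM res s e (ls.map PySem.Str.strip) := by
  induction ls with
  | nil => intro res s e; rfl
  | cons l ls ih =>
      intro res s e
      rw [List.foldl_cons, List.map_cons]
      by_cases hh : PySem.Str.strip l = "passes:" ∨ PySem.Str.strip l = "failures:" ∨
          PySem.Str.strip l = "skips:"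
      · simp only [pvM]; rw [if_pos hh]
        by_cases he : e.items = []
        · rw [pvA_step_hdr_mt res s e l hh he, ih]
          have h1 : pvFlush1 res s e = res := by simp only [pvFlush1]; rw [if_pos he]
          rw [h1, pv_items_nil_eq_empty e he]
        · rw [pvA_step_hdr_full res s e l hh he, ih]
          have h1 : pvFlush1 res s e = res.modify s [] (fun l => l ++ [e]) := by
            simp only [pvFlush1]; rw [if_neg he]
          rw [h1]
      · by_cases hd : PySem.Str.startswith (PySem.Str.strip l) "- " = true
        · simp only [pvM]; rw [if_neg hh, if_pos hd]
          rw [pvA_step_dash res s e l hh hd, ih]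
        · by_cases hc : PySem.Str.isIn ":" (PySem.Str.strip l) = true
          · simp only [pvM]; rw [if_neg hh, if_neg hd]
            rw [pvA_step_colon res s e l hh hd hc, ih]
          · simp only [pvM]; rw [if_neg hh, if_neg hd]
            rw [pvA_step_skip res s e l hh hd hc, ih, pvAddKV_no_colon _ _ hc]

theorem pvA_none (ls : List String) :
    ∀ (res : PySem.Dict String (List (PySem.Dict String String))),
      pvA_finish (ls.foldl pvA_step (res, none, PySem.Dict.empty))
        = pvMnone res (ls.map PySem.Str.strip) := by
  induction ls with
  | nil => intro res; rfl
  | cons l ls ih =>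
      intro res
      rw [List.foldl_cons, List.map_cons]
      by_cases hh : PySem.Str.strip l = "passes:" ∨ PySem.Str.strip l = "failures:" ∨
          PySem.Str.strip l = "skips:"
      · simp only [pvMnone]; rw [if_pos hh]
        rw [pvA_step_hdr_none res PySem.Dict.empty l hh, pvA_main]
      · simp only [pvMnone]; rw [if_neg hh]
        rw [pvA_step_none res PySem.Dict.empty l hh, ih]

-- ===== B side =====
theorem pv_sec_eq (l : String)
    (h : l = "passes:" ∨ l = "failures:" ∨ l = "skips:") :
    PySem.Str.slice l none (some (-1)) = pvRstripColon l := by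
  rcases h with rfl | rfl | rfl <;> decide

theorem pvB_blockfold (ls : List String) :
    ∀ (bs : List (List String)) (b : List String),
      ls.foldl pvB_block_step (bs ++ [b]) = bs ++ pvBlocksCont b ls := by
  induction ls with
  | nil => intro bs b; simp [pvBlocksCont]
  | cons l ls ih =>
      intro bs b
      rw [List.foldl_cons]
      by_cases hd : PySem.Str.startswith l "- " = true
      · have hstep : pvB_block_step (bs ++ [b]) l
            = (bs ++ [b]) ++ [[PySem.Str.slice l (some 2) none]] := by
          simp only [pvB_block_step]; rw [if_pos hd]
        rw [hstep, ih (bs ++ [b]) [PySem.Str.slice l (some 2) none]]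
        simp only [pvBlocksCont]; rw [if_pos hd]
        simp
      · have hstep : pvB_block_step (bs ++ [b]) l = bs ++ [b ++ [l]] := by
          simp only [pvB_block_step]; rw [if_neg hd]
          rw [List.dropLast_concat, List.getLast?_concat, Option.getD_some]
        rw [hstep, ih bs (b ++ [l])]
        simp only [pvBlocksCont]; rw [if_neg hd]

theorem pvB_entries (ls : List String) :
    ∀ (b : List String),
      ((pvBlocksCont b ls).map pvB_parse_block).filter (fun e => !e.items.isEmpty)
        = (pvH (pvB_parse_block b) ls).1 ++ pvFlushList (pvH (pvB_parse_block b) ls).2 := by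
  induction ls with
  | nil =>
      intro b
      simp only [pvBlocksCont, pvH, List.map_cons, List.map_nil, pvFlushList]
      rw [List.filter_singleton]
      cases hq : (pvB_parse_block b).items with
      | nil =>
          simp only [List.isEmpty_nil, Bool.not_true, cond_false, List.nil_append]
          rw [if_pos trivial]
      | cons x xs =>
          have hne : ¬ ((x :: xs : List (String × String)) = []) := by simp
          simp only [List.isEmpty_cons, Bool.not_false, cond_true, List.nil_append]
          rw [if_neg hne]
  | cons l ls ih =>
      intro b
      by_cases hd : PySem.Str.startswith l "- " = true
      · have hb : pvB_parse_block [PySem.Str.slice l (some 2) none]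
            = pvAddKV PySem.Dict.empty (PySem.Str.slice l (some 2) none) := by
          simp only [pvB_parse_block, List.foldl_cons, List.foldl_nil]
        simp only [pvBlocksCont, pvH]; rw [if_pos hd, if_pos hd]
        rw [List.map_cons, List.filter_cons, ih [PySem.Str.slice l (some 2) none], hb]
        cases hq : (pvB_parse_block b).items with
        | nil =>
            simp only [pvFlushList, hq, List.isEmpty_nil, Bool.not_true, Bool.false_eq_true,
              if_false]
            rw [if_pos trivial]
            simp only [List.nil_append]
        | cons x xs =>
            have hne : ¬ ((x :: xs : List (String × String)) = []) := by simp
            simp only [pvFlushList, hq, List.isEmpty_cons, Bool.not_false]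
            rw [if_neg hne]
            simp only [if_true, List.cons_append, List.nil_append]
      · have hb : pvB_parse_block (b ++ [l]) = pvAddKV (pvB_parse_block b) l := by
          simp only [pvB_parse_block, List.foldl_append, List.foldl_cons, List.foldl_nil]
        simp only [pvBlocksCont, pvH]; rw [if_neg hd, if_neg hd]
        rw [ih (b ++ [l]), hb]

theorem pvB_parse_run_eq (ls : List String) :
    pvB_parse_run ls = (pvH PySem.Dict.empty ls).1 ++ pvFlushList (pvH PySem.Dict.empty ls).2 := by
  have h0 : ([[]] : List (List String)) = [] ++ [[]] := rfl
  rw [pvB_parse_run, h0, pvB_blockfold ls [] []]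
  simpa using pvB_entries ls []

theorem pvH_snoc (body : List String) :
    ∀ (e : PySem.Dict String String) (l : String),
      pvH e (body ++ [l])
        = (if PySem.Str.startswith l "- " then
            ((pvH e body).1 ++ pvFlushList (pvH e body).2,
             pvAddKV PySem.Dict.empty (PySem.Str.slice l (some 2) none))
          else ((pvH e body).1, pvAddKV (pvH e body).2 l)) := by
  induction body with
  | nil =>
      intro e l
      rw [List.nil_append, pvH.eq_2]
      simp only [pvH.eq_1]
      by_cases hd : PySem.Str.startswith l "- " = true
      · rw [if_pos hd, if_pos hd]
        simp
      · rw [if_neg hd, if_neg hd]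
  | cons x body ih =>
      intro e l
      rw [List.cons_append]
      simp only [pvH.eq_2, ih]
      by_cases hx : PySem.Str.startswith x "- " = true
      · by_cases hd : PySem.Str.startswith l "- " = true
        · simp at hx hd
          simp [hx, hd, List.append_assoc]
        · simp at hx hd
          simp [hx, hd]
      · by_cases hd : PySem.Str.startswith l "- " = true
        · simp at hx hd
          simp [hx, hd]
        · simp at hx hd
          simp [hx, hd]

theorem pvB_runfold (ls : List String) :
    ∀ (rs : List (String × List String)) (s : String) (body : List String),
      pvB_finalize (ls.foldl pvB_run_step (rs, some s, body)) = rs ++ pvRunsCont s body ls := by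
  induction ls with
  | nil => intro rs s body; rfl
  | cons l ls ih =>
      intro rs s body
      rw [List.foldl_cons]
      by_cases hh : l = "passes:" ∨ l = "failures:" ∨ l = "skips:"
      · have hstep : pvB_run_step (rs, some s, body) l
            = (rs ++ [(s, body)], some (PySem.Str.slice l none (some (-1))), []) := by
          simp only [pvB_run_step]; rw [if_pos hh]
        rw [hstep, pv_sec_eq l hh, ih (rs ++ [(s, body)]) (pvRstripColon l) []]
        simp only [pvRunsCont]; rw [if_pos hh]
        simp
      · have hstep : pvB_run_step (rs, some s, body) l = (rs, some s, body ++ [l]) := by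
          simp only [pvB_run_step]; rw [if_neg hh]
        rw [hstep, ih rs s (body ++ [l])]
        simp only [pvRunsCont]; rw [if_neg hh]

theorem pvB_runfold_none (ls : List String) :
    pvB_finalize (ls.foldl pvB_run_step ([], none, [])) = pvRunsNone ls := by
  induction ls with
  | nil => rfl
  | cons l ls ih =>
      rw [List.foldl_cons]
      by_cases hh : l = "passes:" ∨ l = "failures:" ∨ l = "skips:"
      · have hstep : pvB_run_step ([], none, []) l
            = ([], some (PySem.Str.slice l none (some (-1))), []) := by
          simp only [pvB_run_step]; rw [if_pos hh]
        rw [hstep, pv_sec_eq l hh]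
        simp only [pvRunsNone]; rw [if_pos hh]
        simpa using pvB_runfold ls [] (pvRstripColon l) []
      · have hstep : pvB_run_step ([], none, []) l = ([], none, []) := by
          simp only [pvB_run_step]; rw [if_neg hh]
        rw [hstep, ih]
        simp only [pvRunsNone]; rw [if_neg hh]

theorem pvB_apply_cons (res : PySem.Dict String (List (PySem.Dict String String)))
    (r : String × List String) (runs : List (String × List String)) :
    pvB_apply res (r :: runs) = pvB_apply (pvCondMod res r.1 (pvB_parse_run r.2)) runs := by
  by_cases h : pvB_parse_run r.2 = [] <;> simp [pvB_apply, pvCondMod, h]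

theorem pvB_main (ls : List String) :
    ∀ (s : String) (body : List String)
      (res : PySem.Dict String (List (PySem.Dict String String))),
      pvB_apply res (pvRunsCont s body ls)
        = pvM (pvCondMod res s (pvH PySem.Dict.empty body).1) s (pvH PySem.Dict.empty body).2 ls := by
  induction ls with
  | nil =>
      intro s body res
      simp only [pvRunsCont, pvM]
      rw [pvFlush1_condMod, ← pvB_parse_run_eq]
      show pvB_apply res [(s, body)] = pvCondMod res s (pvB_parse_run body)
      by_cases h : pvB_parse_run body = [] <;> simp [pvB_apply, pvCondMod, h]
  | cons l ls ih =>
      intro s body res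
      by_cases hh : l = "passes:" ∨ l = "failures:" ∨ l = "skips:"
      · simp only [pvRunsCont]; rw [if_pos hh]
        rw [pvB_apply_cons, ih (pvRstripColon l) []]
        have h0 : pvCondMod (pvCondMod res s (pvB_parse_run body)) (pvRstripColon l)
            (pvH PySem.Dict.empty []).1 = pvCondMod res s (pvB_parse_run body) := by
          simp [pvCondMod, pvH.eq_1]
        have h1 : (pvH PySem.Dict.empty ([] : List String)).2 = PySem.Dict.empty := by simp [pvH.eq_1]
        rw [h0, h1]
        simp only [pvM]; rw [if_pos hh]
        rw [pvFlush1_condMod, ← pvB_parse_run_eq]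
      · by_cases hd : PySem.Str.startswith l "- " = true
        · simp only [pvRunsCont]; rw [if_neg hh]
          rw [ih s (body ++ [l]) res, pvH_snoc body PySem.Dict.empty l, if_pos hd]
          simp only [pvM]; rw [if_neg hh, if_pos hd]
          rw [pvFlush1_condMod]
        · simp only [pvRunsCont]; rw [if_neg hh]
          rw [ih s (body ++ [l]) res, pvH_snoc body PySem.Dict.empty l, if_neg hd]
          simp only [pvM]; rw [if_neg hh, if_neg hd]

theorem pvB_none (ls : List String) (res : PySem.Dict String (List (PySem.Dict String String))) :
    pvB_apply res (pvRunsNone ls) = pvMnone res ls := by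
  induction ls with
  | nil => rfl
  | cons l ls ih =>
      by_cases hh : l = "passes:" ∨ l = "failures:" ∨ l = "skips:"
      · simp only [pvRunsNone, pvMnone]; rw [if_pos hh, if_pos hh]
        rw [pvB_main ls (pvRstripColon l) [] res]
        have h0 : pvCondMod res (pvRstripColon l) (pvH PySem.Dict.empty []).1 = res := by
          simp [pvCondMod, pvH.eq_1]
        have h1 : (pvH PySem.Dict.empty ([] : List String)).2 = PySem.Dict.empty := by simp [pvH.eq_1]
        rw [h0, h1]
      · simp only [pvRunsNone, pvMnone]; rw [if_neg hh, if_neg hh]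
        exact ih

-- ===== VERDICT (by name: the statement is the Claim_ definition above) =====
theorem parse_system_out_yaml_py_spec : Claim_equal_parse_system_out_yaml_py := by
  intro text _
  unfold Spec_parse_system_out_yaml_py parse_system_out_yaml_py parse_system_out_yaml_py_alt
  by_cases ht : text = ""
  · subst ht
    have h1 : (PySem.Str.splitlines (PySem.Str.strip "")).map PySem.Str.strip
        = ([] : List String) := by decide
    rw [if_pos rfl, h1]
    rfl
  · rw [if_neg ht]
    congr 1
    rw [pvA_none, pvB_runfold_none, pvB_none]
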